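-- pv_equiv track=rewrite | github.com/kaizen-ai/kaizenflow | helpers/hgit.py | _group_hashes
-- ===== SOURCE A (Python) =====
-- import collections
--
-- def _group_hashes(head_hash: str, remh_hash: str, subm_hash: str) -> str:
--     """
--     head_hash: a
--     remh_hash: b
--     subm_hash: c
--     """
--     map_ = collections.OrderedDict()
--     map_["head_hash"] = head_hash
--     map_["remh_hash"] = remh_hash
--     if subm_hash:
--         map_["subm_hash"] = subm_hash
--     #
--     inv_map = collections.OrderedDict()
--     for k, v in map_.items():
--         if v not in inv_map:
--             inv_map[v] = [k]
--         else:
--             inv_map[v].append(k)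
--     #
--     txt = []
--     for k, v in inv_map.items():
--         # Transform:
--         #   ('a2bfc704', ['head_hash', 'remh_hash'])
--         # into
--         #   'head_hash = remh_hash = a2bfc704'
--         txt.append(f"{' = '.join(v)} = {k}")
--     txt = "\n".join(txt)
--     return txt
-- ===== SOURCE B (Python) =====
-- def _group_hashes(head_hash: str, remh_hash: str, subm_hash: str) -> str:
--     entries = [("head_hash", head_hash), ("remh_hash", remh_hash)]
--     if subm_hash:
--         entries.append(("subm_hash", subm_hash))
--     values = []
--     for _, v in entries:
--         if v not in values:
--             values.append(v)
--     lines = [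
--         " = ".join(n for n, v in entries if v == val) + " = " + val
--         for val in values
--     ]
--     return "\n".join(lines)
-- ===== Notes on version B (the rewrite author's own statement) =====
-- stated objective: alternative
-- what changed: Replaces the inverse OrderedDict (value -> list of names) built in one pass by a flat entries list, a first-seen scan producing the ordered distinct values, and a per-value second scan collecting matching names.
import Mathlib
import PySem

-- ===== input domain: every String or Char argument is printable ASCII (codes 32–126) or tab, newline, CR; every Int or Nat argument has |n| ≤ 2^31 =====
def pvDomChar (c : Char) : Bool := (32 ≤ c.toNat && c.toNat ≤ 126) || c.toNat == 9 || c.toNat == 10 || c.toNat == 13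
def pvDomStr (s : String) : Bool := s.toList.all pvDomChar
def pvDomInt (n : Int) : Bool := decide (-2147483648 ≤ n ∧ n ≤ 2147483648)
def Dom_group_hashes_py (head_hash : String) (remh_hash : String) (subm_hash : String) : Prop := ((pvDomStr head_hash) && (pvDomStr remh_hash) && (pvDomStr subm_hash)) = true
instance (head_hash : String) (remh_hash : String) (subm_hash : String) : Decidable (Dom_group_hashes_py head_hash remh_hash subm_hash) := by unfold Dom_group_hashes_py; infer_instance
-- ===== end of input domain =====

-- ===== PORT A =====
-- B reorganises the group-by: a flat entries list, a first-seen distinct-values scan,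
-- then a per-value rescan collecting names (alternative decomposition; not faster).
-- literal port of A: build map_, invert it into an ordered dict value -> [names], render
def ghStep (inv : PySem.Dict String (List String)) (kv : String × String) : PySem.Dict String (List String) :=
  match inv.get? kv.2 with
  | none => inv.insert kv.2 [kv.1]
  | some l => inv.insert kv.2 (l ++ [kv.1])

def group_hashes_py (head_hash : String) (remh_hash : String) (subm_hash : String) : String :=
  let map_ : PySem.Dict String String :=
    (PySem.Dict.empty.insert "head_hash" head_hash).insert "remh_hash" remh_hash
  let map_ := if subm_hash ≠ "" then map_.insert "subm_hash" subm_hash else map_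
  let inv_map := map_.items.foldl ghStep PySem.Dict.empty
  let txt := inv_map.items.foldl
    (fun acc kv => acc ++ [PySem.Str.join " = " kv.2 ++ " = " ++ kv.1]) []
  PySem.Str.join "\n" txt

-- ===== PORT B =====
def group_hashes_py_alt (head_hash : String) (remh_hash : String) (subm_hash : String) : String :=
  let entries : List (String × String) :=
    [("head_hash", head_hash), ("remh_hash", remh_hash)] ++
      (if subm_hash ≠ "" then [("subm_hash", subm_hash)] else [])
  let values := entries.foldl (fun vs kv => if kv.2 ∈ vs then vs else vs ++ [kv.2]) []
  let lines := values.map (fun v =>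
    PySem.Str.join " = " ((entries.filter (fun kv => kv.2 == v)).map (·.1)) ++ " = " ++ v)
  PySem.Str.join "\n" lines

-- ===== PRECONDITION & SPEC =====
def Spec_group_hashes_py (head_hash : String) (remh_hash : String) (subm_hash : String) (out : String) : Prop := out = group_hashes_py_alt head_hash remh_hash subm_hash
instance (head_hash : String) (remh_hash : String) (subm_hash : String) (out : String) : Decidable (Spec_group_hashes_py head_hash remh_hash subm_hash out) := by unfold Spec_group_hashes_py; infer_instance

-- ===== CLAIM (what is proved, stated in full; the proofs are below) =====
def Claim_equal_group_hashes_py : Prop := ∀ (head_hash : String) (remh_hash : String) (subm_hash : String), Dom_group_hashes_py head_hash remh_hash subm_hash → Spec_group_hashes_py head_hash remh_hash subm_hash (group_hashes_py head_hash remh_hash subm_hash)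

-- ===== LEMMAS AND PROOFS =====
theorem gh_eq (head_hash remh_hash subm_hash : String) :
    group_hashes_py head_hash remh_hash subm_hash
      = group_hashes_py_alt head_hash remh_hash subm_hash := by
  by_cases hc : subm_hash = "" <;>
  by_cases hab : head_hash = remh_hash <;>
  by_cases hac : head_hash = subm_hash <;>
  by_cases hbc : remh_hash = subm_hash <;>
  simp_all [group_hashes_py, group_hashes_py_alt, ghStep, PySem.Dict.empty,
    PySem.Dict.insert, PySem.Dict.get?, List.foldl, List.filter,
    beq_iff_eq] <;>
  (repeat' (split <;> simp_all [beq_iff_eq]))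

-- ===== VERDICT (by name: the statement is the Claim_ definition above) =====
theorem group_hashes_py_spec : Claim_equal_group_hashes_py := by
  intro a b c _
  exact gh_eq a b c
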